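-- pv_equiv track=rewrite | github.com/Herotank1234/AdventOfCode | 2020/q16.py | part1
-- ===== SOURCE A (Python) =====
-- def part1(bounds, nearbyTickets):
--   errorRate = 0
--   for ticket in nearbyTickets:
--     for value in ticket:
--       found = False
--       for key in bounds:
--         for bound in bounds[key]:
--           if bound[0] <= value <= bound[1]:
--             found = True
--             break
--         if found:
--           break
--       if not found:
--         errorRate += value
--   return errorRate
-- ===== SOURCE B (Python) =====
-- def part1(bounds, nearbyTickets):
--   intervals = []
--   for key in bounds:
--     for b in bounds[key]:
--       intervals.append((b[0], b[1]))
--   intervals.sort(key=lambda p: p[0])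
--   merged = []
--   for p in intervals:
--     if merged and p[0] <= merged[-1][1]:
--       if p[1] > merged[-1][1]:
--         merged[-1] = (merged[-1][0], p[1])
--     else:
--       merged.append(p)
--   total = 0
--   for ticket in nearbyTickets:
--     for v in ticket:
--       i, j = 0, len(merged)
--       while i < j:
--         mid = (i + j) // 2
--         if merged[mid][0] <= v:
--           i = mid + 1
--         else:
--           j = mid
--       if i == 0 or merged[i - 1][1] < v:
--         total += v
--   return total
-- ===== Notes on version B (the rewrite author's own statement) =====
-- stated objective: faster
-- what changed: B collects all bound intervals once, sorts them by lower endpoint and merges overlaps into a disjoint list, then tests each ticket value by binary search over the merged intervals, instead of A's per-value linear scan over every bound of every field.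
-- outside the precondition, e.g. on part1({'a': [[5], [0, 10]]}, [[1]]): A returns 0, B raises IndexError; on part1({'a': [[]]}, []): A returns 0, B raises IndexError
import Mathlib
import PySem

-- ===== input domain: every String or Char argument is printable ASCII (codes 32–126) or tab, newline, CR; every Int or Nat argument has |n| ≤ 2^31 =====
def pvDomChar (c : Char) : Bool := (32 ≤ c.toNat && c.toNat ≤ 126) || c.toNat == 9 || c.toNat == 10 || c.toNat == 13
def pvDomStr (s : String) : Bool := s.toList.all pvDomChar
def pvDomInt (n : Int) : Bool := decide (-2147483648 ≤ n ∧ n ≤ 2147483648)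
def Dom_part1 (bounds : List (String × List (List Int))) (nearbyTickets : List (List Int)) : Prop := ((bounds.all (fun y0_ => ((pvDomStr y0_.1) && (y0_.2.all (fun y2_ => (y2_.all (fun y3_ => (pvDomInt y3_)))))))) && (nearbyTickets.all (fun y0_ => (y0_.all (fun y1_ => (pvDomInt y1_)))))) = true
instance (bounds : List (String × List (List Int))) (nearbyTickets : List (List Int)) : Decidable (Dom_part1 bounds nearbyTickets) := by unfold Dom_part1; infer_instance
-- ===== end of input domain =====

-- B replaces A's per-value linear scan over all bounds by one sort-and-merge of the intervals
-- plus a binary search per ticket value (objective: faster, asymptotic).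

-- ===== PORT A =====
def part1 (bounds : List (String × List (List Int))) (nearbyTickets : List (List Int)) : Int :=
  let d := PySem.Dict.ofList bounds
  nearbyTickets.foldl (fun errorRate ticket =>
    ticket.foldl (fun errorRate value =>
      let found := (PySem.Dict.keys d).foldl (fun found key =>
        if found then found
        else (PySem.Dict.getD d key []).foldl (fun found bound =>
          if found then found
          else if PySem.List.pyGetD bound 0 0 ≤ value ∧ value ≤ PySem.List.pyGetD bound 1 0 then true
          else found) found) false
      if !found then errorRate + value else errorRate) errorRate) 0

-- ===== PORT B =====
-- 'for key in bounds: for b in bounds[key]: intervals.append((b[0], b[1]))'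
def pvIntervals (bounds : List (String × List (List Int))) : List (Int × Int) :=
  let d := PySem.Dict.ofList bounds
  (PySem.Dict.keys d).foldl (fun acc key =>
    (PySem.Dict.getD d key []).foldl (fun acc b =>
      acc ++ [(PySem.List.pyGetD b 0 0, PySem.List.pyGetD b 1 0)]) acc) []

-- one step of the interval-merging loop (merged[-1] = last element)
def pvMergeStep (merged : List (Int × Int)) (p : Int × Int) : List (Int × Int) :=
  match merged.getLast? with
  | none => merged ++ [p]
  | some last =>
    if p.1 ≤ last.2 then
      if p.2 > last.2 then merged.dropLast ++ [(last.1, p.2)] else merged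
    else merged ++ [p]

-- the hand-written 'while i < j' binary search of Source B
def pvBsearch (merged : List (Int × Int)) (v : Int) (i j : Nat) : Nat :=
  if _h : i < j then
    let mid := (i + j) / 2
    if (merged.getD mid (0, 0)).1 ≤ v then pvBsearch merged v (mid + 1) j
    else pvBsearch merged v i mid
  else i
termination_by j - i

def part1_alt (bounds : List (String × List (List Int))) (nearbyTickets : List (List Int)) : Int :=
  let intervals := PySem.List.sorted (pvIntervals bounds) (fun p => p.1) false
  let merged := intervals.foldl pvMergeStep []
  nearbyTickets.foldl (fun total ticket =>
    ticket.foldl (fun total v =>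
      let i := pvBsearch merged v 0 merged.length
      if i = 0 ∨ (merged.getD (i - 1) (0, 0)).2 < v then total + v else total) total) 0

-- ===== PRECONDITION & SPEC =====
-- Pre_ excludes inputs where some bound list has fewer than two endpoints: there Python A raises
-- IndexError on bound[0]/bound[1] unless the short bound is never reached or never compared past its
-- first element (an accident of evaluation order), and B's merge always reads both endpoints and raises.
def Pre_part1 (bounds : List (String × List (List Int))) (nearbyTickets : List (List Int)) : Prop :=
  ∀ kv ∈ bounds, ∀ b ∈ kv.2, 2 ≤ b.length
instance (bounds : List (String × List (List Int))) (nearbyTickets : List (List Int)) : Decidable (Pre_part1 bounds nearbyTickets) := by unfold Pre_part1; infer_instance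
def pvWitness_part1 : (List (String × List (List Int))) × List (List Int) :=
  ([("a", [[1, 3]])], [[2, 5]])
def Spec_part1 (bounds : List (String × List (List Int))) (nearbyTickets : List (List Int)) (out : Int) : Prop := out = part1_alt bounds nearbyTickets
instance (bounds : List (String × List (List Int))) (nearbyTickets : List (List Int)) (out : Int) : Decidable (Spec_part1 bounds nearbyTickets out) := by unfold Spec_part1; infer_instance

-- ===== CLAIM (what is proved, stated in full; the proofs are below) =====
def Claim_equal_part1 : Prop := ∀ (bounds : List (String × List (List Int))) (nearbyTickets : List (List Int)), Dom_part1 bounds nearbyTickets → Pre_part1 bounds nearbyTickets → Spec_part1 bounds nearbyTickets (part1 bounds nearbyTickets)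

-- ===== LEMMAS AND PROOFS =====

-- 'xs covers v': some interval of xs contains v
def pvCovers (xs : List (Int × Int)) (v : Int) : Bool :=
  xs.any (fun p => decide (p.1 ≤ v) && decide (v ≤ p.2))

-- the invariant on the merged accumulator: disjoint intervals, ordered by both endpoints
def pvR (a b : Int × Int) : Prop := a.2 < b.1 ∧ a.1 ≤ b.1

theorem pvFound_raw (bounds : List (String × List (List Int))) (v : Int) :
    (PySem.Dict.keys (PySem.Dict.ofList bounds)).foldl (fun found key =>
      if found then found
      else (PySem.Dict.getD (PySem.Dict.ofList bounds) key []).foldl (fun found bound =>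
        if found then found
        else if PySem.List.pyGetD bound 0 0 ≤ v ∧ v ≤ PySem.List.pyGetD bound 1 0 then true
        else found) found) false
    = ((PySem.Dict.keys (PySem.Dict.ofList bounds)).foldl (fun acc key =>
        (PySem.Dict.getD (PySem.Dict.ofList bounds) key []).foldl (fun acc b =>
          acc ++ [(PySem.List.pyGetD b 0 0, PySem.List.pyGetD b 1 0)]) acc) []).any
        (fun p => decide (p.1 ≤ v) && decide (v ≤ p.2)) := by
  set d := PySem.Dict.ofList bounds with hd
  have hinner : ∀ (lst : List (List Int)) (b0 : Bool),
      lst.foldl (fun found bound =>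
        if found then found
        else if PySem.List.pyGetD bound 0 0 ≤ v ∧ v ≤ PySem.List.pyGetD bound 1 0 then true
        else found) b0
      = (b0 || lst.any (fun bound =>
          decide (PySem.List.pyGetD bound 0 0 ≤ v) && decide (v ≤ PySem.List.pyGetD bound 1 0))) := by
    intro lst b0
    have he : (fun (found : Bool) bound =>
        if found then found
        else if PySem.List.pyGetD bound 0 0 ≤ v ∧ v ≤ PySem.List.pyGetD bound 1 0 then true
        else found)
      = (fun ok bound =>
        if (decide (PySem.List.pyGetD bound 0 0 ≤ v) && decide (v ≤ PySem.List.pyGetD bound 1 0)) then true else ok) := by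
      funext f b
      cases f <;> by_cases h1 : PySem.List.pyGetD b 0 0 ≤ v <;>
        by_cases h2 : v ≤ PySem.List.pyGetD b 1 0 <;> simp [h1, h2]
    rw [he, PySem.List.foldl_if_true_eq]
  have houter : (fun (found : Bool) key =>
      if found then found
      else (PySem.Dict.getD d key []).foldl (fun found bound =>
        if found then found
        else if PySem.List.pyGetD bound 0 0 ≤ v ∧ v ≤ PySem.List.pyGetD bound 1 0 then true
        else found) found)
    = (fun ok key => if ((PySem.Dict.getD d key []).any (fun bound =>
          decide (PySem.List.pyGetD bound 0 0 ≤ v) && decide (v ≤ PySem.List.pyGetD bound 1 0))) then true else ok) := by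
    funext f k
    cases f
    · have h1 := hinner (PySem.Dict.getD d k []) false
      simp only [Bool.false_or] at h1
      simp only [Bool.false_eq_true, if_false, h1]
      cases h : (PySem.Dict.getD d k []).any (fun bound =>
          decide (PySem.List.pyGetD bound 0 0 ≤ v) && decide (v ≤ PySem.List.pyGetD bound 1 0)) <;> simp
    · simp only [if_true]
      cases h : (PySem.Dict.getD d k []).any (fun bound =>
          decide (PySem.List.pyGetD bound 0 0 ≤ v) && decide (v ≤ PySem.List.pyGetD bound 1 0)) <;> simp
  rw [houter, PySem.List.foldl_if_true_eq]
  have hcol : ∀ key, ((PySem.Dict.getD d key []).foldl (fun acc b =>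
        acc ++ [(PySem.List.pyGetD b 0 0, PySem.List.pyGetD b 1 0)]) · ) = (· ++ (PySem.Dict.getD d key []).map
        (fun b => (PySem.List.pyGetD b 0 0, PySem.List.pyGetD b 1 0))) := by
    intro key; funext acc; exact PySem.List.foldl_append_singleton_eq_map _ _ _
  have : ((PySem.Dict.keys d).foldl (fun acc key =>
        (PySem.Dict.getD d key []).foldl (fun acc b =>
          acc ++ [(PySem.List.pyGetD b 0 0, PySem.List.pyGetD b 1 0)]) acc) [])
      = (PySem.Dict.keys d).flatMap (fun key => (PySem.Dict.getD d key []).map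
          (fun b => (PySem.List.pyGetD b 0 0, PySem.List.pyGetD b 1 0))) := by
    have := PySem.List.foldl_append_eq_flatMap
      (fun key => (PySem.Dict.getD d key []).map
          (fun b => (PySem.List.pyGetD b 0 0, PySem.List.pyGetD b 1 0)))
      (PySem.Dict.keys d) []
    simp only [List.nil_append] at this
    rw [← this]
    congr 1
    funext acc key
    exact PySem.List.foldl_append_singleton_eq_map _ _ _
  rw [this, List.any_flatMap]
  simp only [List.any_map]
  rfl

-- decompose acc = dropLast ++ [last]
theorem pvLast_decomp {acc : List (Int × Int)} {last : Int × Int}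
    (h : acc.getLast? = some last) : acc = acc.dropLast ++ [last] := by
  rcases List.eq_nil_or_concat acc with rfl | ⟨ys, y, rfl⟩
  · simp at h
  · simp at h
    simp [h]

theorem pvMergeStep_pairwise (acc : List (Int × Int)) (p : Int × Int)
    (hacc : acc.Pairwise pvR) (hle : ∀ m ∈ acc, m.1 ≤ p.1) :
    (pvMergeStep acc p).Pairwise pvR := by
  unfold pvMergeStep
  cases h : acc.getLast? with
  | none =>
    have : acc = [] := by
      cases acc with
      | nil => rfl
      | cons a t => simp at h
    subst this; simp [pvR]
  | some last =>
    have hdec := pvLast_decomp h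
    have hlastmem : last ∈ acc := by rw [hdec]; simp
    by_cases h1 : p.1 ≤ last.2
    · by_cases h2 : p.2 > last.2
      · simp only [h1, h2, if_pos]
        -- replace last (l,h) by (l, p.2): pairwise preserved since fst unchanged
        rw [hdec] at hacc
        rw [List.pairwise_append] at hacc ⊢
        refine ⟨hacc.1, by simp [pvR], ?_⟩
        intro a ha b hb
        have := hacc.2.2 a ha last (by simp)
        simp at hb
        subst hb
        simpa [pvR] using this
      · simpa [h1, h2] using hacc
    · simp only [h1, if_neg, not_false_iff]
      rw [List.pairwise_append]
      refine ⟨hacc, by simp [pvR], ?_⟩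
      intro a ha b hb
      simp at hb
      subst hb
      refine ⟨?_, hle a ha⟩
      -- a.2 < p.1 : a.2 < last.1 ≤ p.1 if a before last, or a = last with last.2 < p.1
      rw [hdec] at ha hacc
      rw [List.pairwise_append] at hacc
      rcases List.mem_append.1 ha with ha' | ha'
      · have h3 := hacc.2.2 a ha' last (by simp)
        have h4 := hle last hlastmem
        exact lt_of_lt_of_le h3.1 (hle last hlastmem)
      · simp at ha'
        subst ha'
        omega
theorem pvMergeStep_los (acc : List (Int × Int)) (p : Int × Int) (c : Int)
    (h1 : ∀ m ∈ acc, m.1 ≤ c) (h2 : p.1 ≤ c) :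
    ∀ m ∈ pvMergeStep acc p, m.1 ≤ c := by
  unfold pvMergeStep
  cases h : acc.getLast? with
  | none => intro m hm; rcases List.mem_append.1 hm with hm | hm
            · exact h1 m hm
            · simp at hm; subst hm; exact h2
  | some last =>
    have hdec := pvLast_decomp h
    have hlastmem : last ∈ acc := by rw [hdec]; simp
    by_cases hc1 : p.1 ≤ last.2
    · by_cases hc2 : p.2 > last.2
      · simp only [hc1, hc2, if_pos]
        intro m hm
        rcases List.mem_append.1 hm with hm | hm
        · exact h1 m (by rw [hdec]; exact List.mem_append.2 (Or.inl hm))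
        · simp at hm; subst hm; exact h1 last hlastmem
      · simp only [hc1, hc2, if_pos, if_neg, not_false_iff]
        intro m hm; exact h1 m hm
    · simp only [hc1, if_neg, not_false_iff]
      intro m hm
      rcases List.mem_append.1 hm with hm | hm
      · exact h1 m hm
      · simp at hm; subst hm; exact h2

theorem pvMergeStep_covers (acc : List (Int × Int)) (p : Int × Int) (v : Int)
    (hle : ∀ m ∈ acc, m.1 ≤ p.1) :
    pvCovers (pvMergeStep acc p) v
      = (pvCovers acc v || (decide (p.1 ≤ v) && decide (v ≤ p.2))) := by
  unfold pvMergeStep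
  cases h : acc.getLast? with
  | none => simp [pvCovers]
  | some last =>
    have hdec := pvLast_decomp h
    have hlastmem : last ∈ acc := by rw [hdec]; simp
    have hlp := hle last hlastmem
    by_cases hc1 : p.1 ≤ last.2
    · by_cases hc2 : p.2 > last.2
      · simp only [hc1, hc2, if_pos]
        conv_rhs => rw [hdec]
        simp only [pvCovers, List.any_append, List.any_cons, List.any_nil]
        cases hcov : (acc.dropLast).any (fun q => decide (q.1 ≤ v) && decide (v ≤ q.2))
        · simp only [Bool.false_or]
          by_cases a1 : last.1 ≤ v <;> by_cases a2 : v ≤ p.2 <;>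
            by_cases a3 : v ≤ last.2 <;> by_cases a4 : p.1 ≤ v <;>
            simp [a1, a2, a3, a4] <;> omega
        · simp
      · simp only [hc1, hc2, if_pos, if_neg, not_false_iff]
        -- skip case: p ⊆ last interval (or empty): covers unchanged
        have : (decide (p.1 ≤ v) && decide (v ≤ p.2)) = true → pvCovers acc v = true := by
          intro hp
          simp only [Bool.and_eq_true, decide_eq_true_eq] at hp
          simp only [pvCovers, List.any_eq_true]
          exact ⟨last, hlastmem, by simp; omega⟩
        cases hp : (decide (p.1 ≤ v) && decide (v ≤ p.2))
        · simp
        · simp [this hp]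
    · simp only [hc1, if_neg, not_false_iff]
      simp [pvCovers, List.any_append]

theorem pvMerge_go (xs : List (Int × Int)) : ∀ (acc : List (Int × Int)),
    xs.Pairwise (fun a b => a.1 ≤ b.1) →
    (∀ m ∈ acc, ∀ q ∈ xs, m.1 ≤ q.1) →
    acc.Pairwise pvR →
    (xs.foldl pvMergeStep acc).Pairwise pvR ∧
      ∀ v, pvCovers (xs.foldl pvMergeStep acc) v = (pvCovers acc v || pvCovers xs v) := by
  induction xs with
  | nil => intro acc _ _ hacc; exact ⟨hacc, fun v => by simp [pvCovers]⟩
  | cons p xs ih =>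
    intro acc hxs hcross hacc
    have hlep : ∀ m ∈ acc, m.1 ≤ p.1 := fun m hm => hcross m hm p (by simp)
    have hstep_pw := pvMergeStep_pairwise acc p hacc hlep
    have hstep_cross : ∀ m ∈ pvMergeStep acc p, ∀ q ∈ xs, m.1 ≤ q.1 := by
      intro m hm q hq
      exact pvMergeStep_los acc p q.1
        (fun m' hm' => hcross m' hm' q (by simp [hq]))
        ((List.pairwise_cons.1 hxs).1 q hq) m hm
    obtain ⟨hpw, hcov⟩ := ih (pvMergeStep acc p) (List.pairwise_cons.1 hxs).2 hstep_cross hstep_pw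
    refine ⟨by simpa using hpw, fun v => ?_⟩
    simp only [List.foldl_cons] at *
    rw [hcov v, pvMergeStep_covers acc p v hlep]
    simp [pvCovers, Bool.or_assoc]

theorem pvBsearch_spec (merged : List (Int × Int)) (v : Int)
    (hmono : ∀ a b : Nat, a ≤ b → b < merged.length →
      (merged.getD a (0, 0)).1 ≤ (merged.getD b (0, 0)).1) :
    ∀ (i j : Nat), i ≤ j → j ≤ merged.length →
    (∀ k, k < i → (merged.getD k (0, 0)).1 ≤ v) →
    (∀ k, j ≤ k → k < merged.length → v < (merged.getD k (0, 0)).1) →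
    i ≤ pvBsearch merged v i j ∧ pvBsearch merged v i j ≤ j ∧
      (∀ k, k < pvBsearch merged v i j → (merged.getD k (0, 0)).1 ≤ v) ∧
      (∀ k, pvBsearch merged v i j ≤ k → k < merged.length → v < (merged.getD k (0, 0)).1) := by
  intro i j
  induction hfuel : j - i using Nat.strong_induction_on generalizing i j with
  | _ n ih =>
  intro hij hjlen hlo hhi
  rw [pvBsearch]
  by_cases h : i < j
  · simp only [h, dif_pos]
    by_cases hm : (merged.getD ((i + j) / 2) (0, 0)).1 ≤ v
    · simp only [hm, if_pos]
      have hmidlt : (i + j) / 2 < j := by omega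
      have h1 : ∀ k, k < (i + j) / 2 + 1 → (merged.getD k (0, 0)).1 ≤ v := by
        intro k hk
        exact le_trans (hmono k ((i + j) / 2) (by omega) (by omega)) hm
      have := ih (j - ((i+j)/2 + 1)) (by omega) ((i+j)/2 + 1) j rfl (by omega) hjlen h1 hhi
      exact ⟨by omega, this.2.1, this.2.2⟩
    · simp only [hm, if_neg, not_false_iff]
      rw [not_le] at hm
      have h2 : ∀ k, (i + j) / 2 ≤ k → k < merged.length → v < (merged.getD k (0, 0)).1 := by
        intro k hk hklen
        exact lt_of_lt_of_le hm (hmono ((i+j)/2) k hk hklen)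
      have := ih ((i+j)/2 - i) (by omega) i ((i+j)/2) rfl (by omega) (by omega) hlo h2
      exact ⟨this.1, by omega, this.2.2.1, fun k hk hklen => this.2.2.2 k hk hklen⟩
  · simp only [h, dif_neg, not_false_iff]
    exact ⟨le_refl _, hij, fun k hk => hlo k hk, fun k hk hklen => hhi k (by omega) hklen⟩

theorem pvTest_iff (merged : List (Int × Int)) (v : Int) (hR : merged.Pairwise pvR) :
    (pvBsearch merged v 0 merged.length = 0 ∨
      (merged.getD (pvBsearch merged v 0 merged.length - 1) (0, 0)).2 < v)
    ↔ pvCovers merged v = false := by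
  have hmono : ∀ a b : Nat, a ≤ b → b < merged.length →
      (merged.getD a (0, 0)).1 ≤ (merged.getD b (0, 0)).1 := by
    intro a b hab hb
    rcases Nat.eq_or_lt_of_le hab with rfl | h
    · exact le_refl _
    · have hp := List.pairwise_iff_getElem.1 hR a b (by omega) hb h
      rw [List.getD_eq_getElem merged (0,0) (by omega), List.getD_eq_getElem merged (0,0) hb]
      exact hp.2
  obtain ⟨h0, hlen, hlo, hhi⟩ := pvBsearch_spec merged v hmono 0 merged.length
    (by omega) (le_refl _) (by intro k hk; omega) (by intro k hk hkl; omega)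
  set r := pvBsearch merged v 0 merged.length with hr
  have hcovfalse : pvCovers merged v = false ↔
      ∀ k, (hk : k < merged.length) → ¬((merged[k].1 ≤ v) ∧ (v ≤ merged[k].2)) := by
    simp only [pvCovers, List.any_eq_false, Bool.and_eq_true, decide_eq_true_eq]
    constructor
    · intro h k hk hc
      exact h merged[k] (List.getElem_mem hk) hc
    · intro h p hp
      obtain ⟨k, hk, rfl⟩ := List.mem_iff_getElem.1 hp
      simpa using h k hk
  by_cases hr0 : r = 0
  · have : pvCovers merged v = false := by
      rw [hcovfalse]
      intro k hk hc
      have := hhi k (by omega) hk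
      rw [List.getD_eq_getElem merged (0,0) hk] at this
      omega
    exact iff_of_true (Or.inl hr0) this
  · have hr1 : r - 1 < merged.length := by omega
    by_cases hv : (merged.getD (r - 1) (0, 0)).2 < v
    · have : pvCovers merged v = false := by
        rw [hcovfalse]
        intro k hk hc
        rcases lt_trichotomy k (r - 1) with hlt | heq | hgt
        · have hpw := List.pairwise_iff_getElem.1 hR k (r - 1) hk hr1 hlt
          have hlor1 : (merged.getD (r-1) (0,0)).1 ≤ v := hlo (r-1) (by omega)
          rw [List.getD_eq_getElem merged (0,0) hr1] at hlor1
          have : merged[k].2 < merged[r-1].1 := hpw.1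
          omega
        · subst heq
          rw [List.getD_eq_getElem merged (0,0) hr1] at hv
          omega
        · have := hhi k (by omega) hk
          rw [List.getD_eq_getElem merged (0,0) hk] at this
          omega
      exact iff_of_true (Or.inr hv) this
    · have hcov : pvCovers merged v = true := by
        simp only [pvCovers, List.any_eq_true]
        refine ⟨merged[r-1], List.getElem_mem hr1, ?_⟩
        have hlor1 : (merged.getD (r-1) (0,0)).1 ≤ v := hlo (r-1) (by omega)
        rw [List.getD_eq_getElem merged (0,0) hr1] at hlor1 hv
        simp
        omega
      refine iff_of_false ?_ (by simp [hcov])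
      rintro (h | h)
      · exact hr0 h
      · exact hv h

-- restated through pvCovers/pvIntervals (definitionally the same right-hand side)
theorem pvFound_eq_covers (bounds : List (String × List (List Int))) (v : Int) :
    (PySem.Dict.keys (PySem.Dict.ofList bounds)).foldl (fun found key =>
      if found then found
      else (PySem.Dict.getD (PySem.Dict.ofList bounds) key []).foldl (fun found bound =>
        if found then found
        else if PySem.List.pyGetD bound 0 0 ≤ v ∧ v ≤ PySem.List.pyGetD bound 1 0 then true
        else found) found) false
    = pvCovers (pvIntervals bounds) v := by
  unfold pvCovers pvIntervals
  exact pvFound_raw bounds v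

-- A's per-value test agrees with B's per-value test, for every value
theorem pvStep_eq (bounds : List (String × List (List Int))) (v : Int) :
    (!((PySem.Dict.keys (PySem.Dict.ofList bounds)).foldl (fun found key =>
        if found then found
        else (PySem.Dict.getD (PySem.Dict.ofList bounds) key []).foldl (fun found bound =>
          if found then found
          else if PySem.List.pyGetD bound 0 0 ≤ v ∧ v ≤ PySem.List.pyGetD bound 1 0 then true
          else found) found) false))
    = decide (pvBsearch ((PySem.List.sorted (pvIntervals bounds) (fun p => p.1) false).foldl pvMergeStep []) v 0
        ((PySem.List.sorted (pvIntervals bounds) (fun p => p.1) false).foldl pvMergeStep []).length = 0 ∨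
        (((PySem.List.sorted (pvIntervals bounds) (fun p => p.1) false).foldl pvMergeStep []).getD
          (pvBsearch ((PySem.List.sorted (pvIntervals bounds) (fun p => p.1) false).foldl pvMergeStep []) v 0
            ((PySem.List.sorted (pvIntervals bounds) (fun p => p.1) false).foldl pvMergeStep []).length - 1)
          (0, 0)).2 < v) := by
  set merged := (PySem.List.sorted (pvIntervals bounds) (fun p => p.1) false).foldl pvMergeStep [] with hm
  have hsortpw : (PySem.List.sorted (pvIntervals bounds) (fun p => p.1) false).Pairwise
      (fun a b => a.1 ≤ b.1) := PySem.List.sorted_pairwise _ _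
  obtain ⟨hpw, hcov⟩ := pvMerge_go (PySem.List.sorted (pvIntervals bounds) (fun p => p.1) false)
    [] hsortpw (by simp) (by simp)
  rw [← hm] at hpw
  have hcovm : pvCovers merged v = pvCovers (pvIntervals bounds) v := by
    have h1 := hcov v
    rw [← hm] at h1
    simp only [pvCovers] at h1 ⊢
    rw [h1]
    simp only [List.any_nil, Bool.false_or]
    exact (PySem.List.sorted_perm (pvIntervals bounds) (fun p => p.1) false).any_eq
  have htest := pvTest_iff merged v hpw
  rw [pvFound_eq_covers bounds v, ← hcovm]
  cases hc : pvCovers merged v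
  · rw [Bool.not_false, decide_eq_true (htest.2 hc)]
  · have hnt : ¬(pvBsearch merged v 0 merged.length = 0 ∨
        (merged.getD (pvBsearch merged v 0 merged.length - 1) (0, 0)).2 < v) := by
      intro h
      have h2 := htest.1 h
      rw [hc] at h2
      exact absurd h2 (by simp)
    rw [Bool.not_true, decide_eq_false hnt]

-- ===== VERDICT (by name: the statement is the Claim_ definition above) =====
theorem part1_spec : Claim_equal_part1 := by
  intro bounds nearbyTickets _ _
  have hstep : (fun (errorRate value : Int) =>
      if !((PySem.Dict.keys (PySem.Dict.ofList bounds)).foldl (fun found key =>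
        if found then found
        else (PySem.Dict.getD (PySem.Dict.ofList bounds) key []).foldl (fun found bound =>
          if found then found
          else if PySem.List.pyGetD bound 0 0 ≤ value ∧ value ≤ PySem.List.pyGetD bound 1 0 then true
          else found) found) false) then errorRate + value else errorRate)
    = (fun (total v : Int) =>
      if pvBsearch ((PySem.List.sorted (pvIntervals bounds) (fun p => p.1) false).foldl pvMergeStep []) v 0
        ((PySem.List.sorted (pvIntervals bounds) (fun p => p.1) false).foldl pvMergeStep []).length = 0 ∨
        (((PySem.List.sorted (pvIntervals bounds) (fun p => p.1) false).foldl pvMergeStep []).getD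
          (pvBsearch ((PySem.List.sorted (pvIntervals bounds) (fun p => p.1) false).foldl pvMergeStep []) v 0
            ((PySem.List.sorted (pvIntervals bounds) (fun p => p.1) false).foldl pvMergeStep []).length - 1)
          (0, 0)).2 < v then total + v else total) := by
    funext e v
    rw [pvStep_eq bounds v]
    by_cases h : (pvBsearch ((PySem.List.sorted (pvIntervals bounds) (fun p => p.1) false).foldl pvMergeStep []) v 0
        ((PySem.List.sorted (pvIntervals bounds) (fun p => p.1) false).foldl pvMergeStep []).length = 0 ∨
        (((PySem.List.sorted (pvIntervals bounds) (fun p => p.1) false).foldl pvMergeStep []).getD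
          (pvBsearch ((PySem.List.sorted (pvIntervals bounds) (fun p => p.1) false).foldl pvMergeStep []) v 0
            ((PySem.List.sorted (pvIntervals bounds) (fun p => p.1) false).foldl pvMergeStep []).length - 1)
          (0, 0)).2 < v)
    · rw [if_pos h, if_pos (decide_eq_true h)]
    · rw [if_neg h, if_neg (by rw [decide_eq_false h]; simp)]
  show List.foldl (fun errorRate ticket => List.foldl (fun errorRate value =>
      if !((PySem.Dict.keys (PySem.Dict.ofList bounds)).foldl (fun found key =>
        if found then found
        else (PySem.Dict.getD (PySem.Dict.ofList bounds) key []).foldl (fun found bound =>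
          if found then found
          else if PySem.List.pyGetD bound 0 0 ≤ value ∧ value ≤ PySem.List.pyGetD bound 1 0 then true
          else found) found) false) then errorRate + value else errorRate) errorRate ticket) 0 nearbyTickets
    = List.foldl (fun total ticket => List.foldl (fun total v =>
      if pvBsearch ((PySem.List.sorted (pvIntervals bounds) (fun p => p.1) false).foldl pvMergeStep []) v 0
        ((PySem.List.sorted (pvIntervals bounds) (fun p => p.1) false).foldl pvMergeStep []).length = 0 ∨
        (((PySem.List.sorted (pvIntervals bounds) (fun p => p.1) false).foldl pvMergeStep []).getD
          (pvBsearch ((PySem.List.sorted (pvIntervals bounds) (fun p => p.1) false).foldl pvMergeStep []) v 0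
            ((PySem.List.sorted (pvIntervals bounds) (fun p => p.1) false).foldl pvMergeStep []).length - 1)
          (0, 0)).2 < v then total + v else total) total ticket) 0 nearbyTickets
  rw [hstep]
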